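-- pv_equiv track=rewrite | github.com/MatiasRodriguez01/repositorio1 | parcial2/mutante.py | d1
-- ===== SOURCE A (Python) =====
-- def d1(array, element, rows, columns):
--     count = 0  # se inicializara la variable count en 0
--     # Se crearan 2 bucles for, uno iniciara desde la fila recibira hasta 5
--     # y el otro desde la columna recibida hasta 5
--     for i in range(rows, 6):
--         for j in range(columns, 6):
--             # Aca para analizar la diagonal, diremos que si el valor de la filas
--             # es igual al valor de la columnas
--             if (j==i):
--                 # aca decimos si el valor de la matriz es igual a la letra recibida
--                 # Si la condicion se cumple el valor de "X" aumentara en 1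
--                 if array[i][j] == element:
--                     count += 1
--             else:
--                 #En caso de que el elemento este en un lugar especial y la secuencia empiece cuando las
--                 # filas y las columnas no sean iguales, hacemos una resta con las filas y las columnas.
--                 # Si la resta es igual a 1 entonces empieza la secuencia
--                 product = i-j
--                 if product < 0:
--                     # con esto hacemos por si la resta es negativa.
--                     product *= (-1)
--                 # Entonces si la resta es igual 1, empieza la secuencia diagonal.
--                 if product == 1:
--                     if array[i][j] == element:
--                         count += 1
--     # Al final la funcion devolvera el valor de "X" y se asiganara en la variable "counter" de la funcion diagonally_1
--     return count
-- ===== SOURCE B (Python) =====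
-- def d1(array, element, rows, columns):
--     count = 0
--     for i in range(rows, 6):
--         for j in (i - 1, i, i + 1):
--             if columns <= j < 6 and array[i][j] == element:
--                 count += 1
--     return count
-- ===== Notes on version B (the rewrite author's own statement) =====
-- stated objective: idiomatic
-- what changed: B walks only the three candidate diagonal columns {i-1,i,i+1} per row and range-tests them, instead of scanning the whole [columns,6) column range and filtering with the j==i / |i-j|==1 predicates; the inner scan over all columns disappears.
import Mathlib
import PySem

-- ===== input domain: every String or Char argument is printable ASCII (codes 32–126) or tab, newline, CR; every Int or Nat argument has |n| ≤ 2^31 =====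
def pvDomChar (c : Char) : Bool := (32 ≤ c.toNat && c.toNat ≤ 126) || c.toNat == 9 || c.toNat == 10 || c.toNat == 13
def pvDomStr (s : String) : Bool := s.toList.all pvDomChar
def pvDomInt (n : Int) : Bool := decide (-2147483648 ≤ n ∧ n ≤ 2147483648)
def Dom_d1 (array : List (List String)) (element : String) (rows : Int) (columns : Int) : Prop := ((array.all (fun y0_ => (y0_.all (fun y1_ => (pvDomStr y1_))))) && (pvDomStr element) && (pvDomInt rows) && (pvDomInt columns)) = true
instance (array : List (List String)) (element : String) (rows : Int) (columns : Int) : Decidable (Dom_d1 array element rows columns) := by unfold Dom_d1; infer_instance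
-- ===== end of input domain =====

-- B visits only the three candidate diagonal columns {i-1,i,i+1} per row (range-tested),
-- instead of scanning the whole [columns,6) column range and filtering with predicates.


-- array[i][j] in Python semantics (none = IndexError; Pre_ excludes those)
def pvCell (array : List (List String)) (i j : Int) : Option String :=
  (PySem.List.pyGet? array i).bind (fun row => PySem.List.pyGet? row j)

-- ===== PORT A =====
def d1 (array : List (List String)) (element : String) (rows : Int) (columns : Int) : Int :=
  (PySem.List.pyRange rows 6 1).foldl (fun count i =>
    (PySem.List.pyRange columns 6 1).foldl (fun count j =>
      if j == i then
        -- array[i][j] == element; none = IndexError, excluded by Pre_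
        match pvCell array i j with
        | some v => if v == element then count + 1 else count
        | none => count
      else
        let product := i - j
        let product := if product < 0 then product * (-1) else product
        if product == 1 then
          match pvCell array i j with
          | some v => if v == element then count + 1 else count
          | none => count
        else count) count) 0

-- ===== PORT B =====
def d1_alt (array : List (List String)) (element : String) (rows : Int) (columns : Int) : Int :=
  (PySem.List.pyRange rows 6 1).foldl (fun count i =>
    [i - 1, i, i + 1].foldl (fun count j =>
      if columns ≤ j ∧ j < 6 then
        match pvCell array i j with
        | some v => if v == element then count + 1 else count
        | none => count
      else count) count) 0

-- ===== PRECONDITION & SPEC =====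
-- Pre_: every cell A actually reads (i in [rows,6), j in [columns,6), |i-j| ≤ 1) exists
-- under Python indexing (negative indices wrap); elsewhere A raises IndexError.
-- A row i is read iff max rows (columns-1) ≤ i < 6 (and columns < 6); the first read row
-- already fails when it is below -array.length, which keeps the checked range small.
def Pre_d1 (array : List (List String)) (element : String) (rows : Int) (columns : Int) : Prop :=
  columns < 6 →
    max rows (columns - 1) < 6 →
      -(array.length : Int) ≤ max rows (columns - 1) ∧
      ∀ i ∈ PySem.List.pyRange (max rows (columns - 1)) 6 1, ∀ j ∈ [i - 1, i, i + 1],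
        columns ≤ j → j < 6 → (pvCell array i j).isSome = true
instance (array : List (List String)) (element : String) (rows : Int) (columns : Int) : Decidable (Pre_d1 array element rows columns) := by unfold Pre_d1; infer_instance

def pvWitness_d1 : List (List String) × String × Int × Int :=
  ([["a","b","a","b","a","b"], ["b","a","b","a","b","a"],
    ["a","b","a","b","a","b"], ["b","a","b","a","b","a"],
    ["a","b","a","b","a","b"], ["b","a","b","a","b","a"]], "a", 4, 4)

def Spec_d1 (array : List (List String)) (element : String) (rows : Int) (columns : Int) (out : Int) : Prop := out = d1_alt array element rows columns
instance (array : List (List String)) (element : String) (rows : Int) (columns : Int) (out : Int) : Decidable (Spec_d1 array element rows columns out) := by unfold Spec_d1; infer_instance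

-- ===== CLAIM (what is proved, stated in full; the proofs are below) =====
def Claim_equal_d1 : Prop := ∀ (array : List (List String)) (element : String) (rows : Int) (columns : Int), Dom_d1 array element rows columns → Pre_d1 array element rows columns → Spec_d1 array element rows columns (d1 array element rows columns)

-- ===== LEMMAS AND PROOFS =====

-- the common "test the cell" step
def pvHit (array : List (List String)) (element : String) (i j : Int) : Int :=
  match pvCell array i j with
  | some v => if v == element then 1 else 0
  | none => 0

lemma pvMatch_eq (array : List (List String)) (element : String) (i j c : Int) :
    (match pvCell array i j with
      | some v => if v == element then c + 1 else c
      | none => c)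
    = c + pvHit array element i j := by
  unfold pvHit
  cases pvCell array i j with
  | none => simp
  | some v => by_cases hv : (v == element) = true <;> simp [hv]

-- A's inner scan over [a,6), counting band cells, in closed form
lemma pvA3 (t : Int → Int) (i : Int) :
    ∀ (n : Nat) (a c : Int), (6 - a).toNat = n →
    (PySem.List.pyRange a 6 1).foldl
        (fun c j => if j = i ∨ i - j = 1 ∨ j - i = 1 then c + t j else c) c
    = c + (if a ≤ i - 1 ∧ i - 1 < 6 then t (i - 1) else 0)
        + (if a ≤ i ∧ i < 6 then t i else 0)
        + (if a ≤ i + 1 ∧ i + 1 < 6 then t (i + 1) else 0) := by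
  intro n
  induction n with
  | zero =>
    intro a c h
    rw [PySem.List.pyRange_one_eq_nil (by omega)]
    simp only [List.foldl]
    split_ifs <;> omega
  | succ n ih =>
    intro a c h
    rw [PySem.List.pyRange_one_cons (by omega), List.foldl_cons, ih (a + 1) _ (by omega)]
    by_cases h1 : a = i - 1
    · subst h1; split_ifs <;> omega
    · by_cases h2 : a = i
      · subst h2; split_ifs <;> omega
      · by_cases h3 : a = i + 1
        · subst h3; split_ifs <;> omega
        · split_ifs <;> omega

-- B's three-candidate fold in the same closed form
lemma pvB3 (t : Int → Int) (a i c : Int) :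
    [i - 1, i, i + 1].foldl (fun c j => if a ≤ j ∧ j < 6 then c + t j else c) c
    = c + (if a ≤ i - 1 ∧ i - 1 < 6 then t (i - 1) else 0)
        + (if a ≤ i ∧ i < 6 then t i else 0)
        + (if a ≤ i + 1 ∧ i + 1 < 6 then t (i + 1) else 0) := by
  simp only [List.foldl]
  split_ifs <;> omega

-- one row: A's inner loop equals B's inner loop
lemma pvRow (array : List (List String)) (element : String) (columns i c : Int) :
    (PySem.List.pyRange columns 6 1).foldl (fun count j =>
      if j == i then
        match pvCell array i j with
        | some v => if v == element then count + 1 else count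
        | none => count
      else
        let product := i - j
        let product := if product < 0 then product * (-1) else product
        if product == 1 then
          match pvCell array i j with
          | some v => if v == element then count + 1 else count
          | none => count
        else count) c
    = [i - 1, i, i + 1].foldl (fun count j =>
        if columns ≤ j ∧ j < 6 then
          match pvCell array i j with
          | some v => if v == element then count + 1 else count
          | none => count
        else count) c := by
  have ha : (fun (count j : Int) =>
      if j == i then
        match pvCell array i j with
        | some v => if v == element then count + 1 else count
        | none => count
      else
        let product := i - j
        let product := if product < 0 then product * (-1) else product
        if product == 1 then
          match pvCell array i j with
          | some v => if v == element then count + 1 else count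
          | none => count
        else count)
      = fun count j => if j = i ∨ i - j = 1 ∨ j - i = 1 then count + pvHit array element i j else count := by
    funext count j
    simp only [pvMatch_eq]
    simp only [beq_iff_eq]
    split_ifs <;> first | rfl | omega
  have hb : (fun (count j : Int) =>
      if columns ≤ j ∧ j < 6 then
        match pvCell array i j with
        | some v => if v == element then count + 1 else count
        | none => count
      else count)
      = fun count j => if columns ≤ j ∧ j < 6 then count + pvHit array element i j else count := by
    funext count j
    simp only [pvMatch_eq]
  rw [ha, hb, pvA3 (pvHit array element i) i (6 - columns).toNat columns c rfl,
     pvB3 (pvHit array element i) columns i c]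

-- ===== VERDICT (by name: the statement is the Claim_ definition above) =====
theorem d1_spec : Claim_equal_d1 := by
  intro array element rows columns _ _
  unfold Spec_d1 d1 d1_alt
  have h : (fun (count i : Int) =>
      (PySem.List.pyRange columns 6 1).foldl (fun count j =>
        if j == i then
          match pvCell array i j with
          | some v => if v == element then count + 1 else count
          | none => count
        else
          let product := i - j
          let product := if product < 0 then product * (-1) else product
          if product == 1 then
            match pvCell array i j with
            | some v => if v == element then count + 1 else count
            | none => count
          else count) count)
    = fun count i => [i - 1, i, i + 1].foldl (fun count j =>
        if columns ≤ j ∧ j < 6 then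
          match pvCell array i j with
          | some v => if v == element then count + 1 else count
          | none => count
        else count) count := by
    funext count i
    exact pvRow array element columns i count
  rw [h]
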